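-- pv_equiv track=rewrite | github.com/hushchyn-mikhail/tabular_data_generation | notebooks/TabSyn/load_data.py | get_column_name_mapping
-- ===== SOURCE A (Python) =====
-- def get_column_name_mapping(data_df, num_col_idx, cat_col_idx, target_col_idx, column_names = None):
--
--     idx_mapping = {}
--
--     curr_num_idx = 0
--     curr_cat_idx = len(num_col_idx)
--     curr_target_idx = curr_cat_idx + len(cat_col_idx)
--
--     for idx in range(len(column_names)):
--
--         if idx in num_col_idx:
--             idx_mapping[int(idx)] = curr_num_idx
--             curr_num_idx += 1
--         elif idx in cat_col_idx:
--             idx_mapping[int(idx)] = curr_cat_idx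
--             curr_cat_idx += 1
--         else:
--             idx_mapping[int(idx)] = curr_target_idx
--             curr_target_idx += 1
--
--
--     inverse_idx_mapping = {}
--     for k, v in idx_mapping.items():
--         inverse_idx_mapping[int(v)] = k
--
--     idx_name_mapping = {}
--
--     for i in range(len(column_names)):
--         idx_name_mapping[int(i)] = column_names[i]
--
--     return idx_mapping, inverse_idx_mapping, idx_name_mapping
-- ===== SOURCE B (Python) =====
-- def get_column_name_mapping(data_df, num_col_idx, cat_col_idx, target_col_idx, column_names=None):
--     n = len(column_names)
--     num_len = len(num_col_idx)
--     cat_len = len(cat_col_idx)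
--     num_set = set(num_col_idx)
--     cat_set = set(cat_col_idx)
--
--     def pos(i):
--         # closed-form position of column i: its group's offset plus i's rank within the group
--         if i in num_set:
--             return sum(1 for j in range(i) if j in num_set)
--         if i in cat_set:
--             return num_len + sum(1 for j in range(i)
--                                  if j not in num_set and j in cat_set)
--         return num_len + cat_len + sum(1 for j in range(i)
--                                        if j not in num_set and j not in cat_set)
--
--     idx_mapping = {i: pos(i) for i in range(n)}
--     inverse_idx_mapping = {v: k for k, v in idx_mapping.items()}
--     idx_name_mapping = {i: name for i, name in enumerate(column_names)}
--     return idx_mapping, inverse_idx_mapping, idx_name_mapping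
-- ===== Notes on version B (the rewrite author's own statement) =====
-- stated objective: alternative
-- what changed: Replaces A's single pass with three mutated running counters by a stateless closed-form position function (group offset + rank of the index within its group, computed by counting) applied in a dict comprehension, with the inverse and name maps built by comprehensions.
import Mathlib
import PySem

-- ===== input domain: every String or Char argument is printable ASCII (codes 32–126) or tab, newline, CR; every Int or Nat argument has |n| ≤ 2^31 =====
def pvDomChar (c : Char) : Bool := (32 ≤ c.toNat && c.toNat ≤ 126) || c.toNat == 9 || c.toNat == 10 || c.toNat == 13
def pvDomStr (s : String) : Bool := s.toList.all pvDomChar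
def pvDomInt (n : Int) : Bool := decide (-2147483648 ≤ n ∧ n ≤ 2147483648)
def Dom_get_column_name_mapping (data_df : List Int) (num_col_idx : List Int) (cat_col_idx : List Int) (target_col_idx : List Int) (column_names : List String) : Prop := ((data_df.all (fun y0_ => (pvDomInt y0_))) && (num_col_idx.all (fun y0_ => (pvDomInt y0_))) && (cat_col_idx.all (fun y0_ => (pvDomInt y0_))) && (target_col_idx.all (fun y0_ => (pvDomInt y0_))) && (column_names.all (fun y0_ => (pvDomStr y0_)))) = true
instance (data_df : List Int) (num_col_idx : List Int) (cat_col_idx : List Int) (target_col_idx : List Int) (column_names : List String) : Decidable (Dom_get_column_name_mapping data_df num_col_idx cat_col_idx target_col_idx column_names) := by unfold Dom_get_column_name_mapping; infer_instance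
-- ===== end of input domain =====

-- B replaces A's single pass with three mutated counters by a stateless closed-form position
-- (group offset + rank within the group) used in dict comprehensions; same results, no speed claim.

-- ===== PORT A =====
-- one step of A's for-loop: state is (idx_mapping, curr_num_idx, curr_cat_idx, curr_target_idx)
def pvStepA (num_col_idx cat_col_idx : List Int) (st : PySem.Dict Int Int × Int × Int × Int) (idx : Int) : PySem.Dict Int Int × Int × Int × Int :=
  if num_col_idx.contains idx then
    (st.1.insert idx st.2.1, st.2.1 + 1, st.2.2.1, st.2.2.2)
  else if cat_col_idx.contains idx then
    (st.1.insert idx st.2.2.1, st.2.1, st.2.2.1 + 1, st.2.2.2)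
  else
    (st.1.insert idx st.2.2.2, st.2.1, st.2.2.1, st.2.2.2 + 1)

def get_column_name_mapping (data_df : List Int) (num_col_idx : List Int) (cat_col_idx : List Int) (target_col_idx : List Int) (column_names : List String) : (List (Int × Int)) × (List (Int × Int)) × (List (Int × String)) :=
  let st := (PySem.List.pyRange 0 (PySem.List.len column_names) 1).foldl
      (pvStepA num_col_idx cat_col_idx)
      (PySem.Dict.empty, 0, (num_col_idx.length : Int), ((num_col_idx.length : Int) + (cat_col_idx.length : Int)))
  let idx_mapping := st.1
  let inverse_idx_mapping := idx_mapping.items.foldl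
      (fun (d : PySem.Dict Int Int) kv => d.insert kv.2 kv.1) PySem.Dict.empty
  -- column_names[i] with i always in range: pyGetD's default is never read
  let idx_name_mapping := (PySem.List.pyRange 0 (PySem.List.len column_names) 1).foldl
      (fun (d : PySem.Dict Int String) i => d.insert i (PySem.List.pyGetD column_names i "")) PySem.Dict.empty
  (idx_mapping.items, inverse_idx_mapping.items, idx_name_mapping.items)

-- ===== PORT B =====
-- B's pos(i): group offset plus rank of i within its group (counted over range(i), membership via sets)
def pvPosB (num_set cat_set : PySem.Set Int) (num_len cat_len : Int) (i : Int) : Int :=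
  if num_set.contains i then
    (((PySem.List.pyRange 0 i 1).countP (fun j => num_set.contains j) : Nat) : Int)
  else if cat_set.contains i then
    num_len +
      (((PySem.List.pyRange 0 i 1).countP (fun j => !num_set.contains j && cat_set.contains j) : Nat) : Int)
  else
    num_len + cat_len +
      (((PySem.List.pyRange 0 i 1).countP (fun j => !num_set.contains j && !cat_set.contains j) : Nat) : Int)

def get_column_name_mapping_alt (data_df : List Int) (num_col_idx : List Int) (cat_col_idx : List Int) (target_col_idx : List Int) (column_names : List String) : (List (Int × Int)) × (List (Int × Int)) × (List (Int × String)) :=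
  let n := PySem.List.len column_names
  let num_set := PySem.Set.ofList num_col_idx
  let cat_set := PySem.Set.ofList cat_col_idx
  let idx_mapping := PySem.Dict.ofList
      ((PySem.List.pyRange 0 n 1).map
        (fun i => (i, pvPosB num_set cat_set (num_col_idx.length : Int) (cat_col_idx.length : Int) i)))
  let inverse_idx_mapping := PySem.Dict.ofList (idx_mapping.items.map (fun kv => (kv.2, kv.1)))
  let idx_name_mapping := PySem.Dict.ofList (PySem.List.enumerate column_names)
  (idx_mapping.items, inverse_idx_mapping.items, idx_name_mapping.items)

-- ===== PRECONDITION & SPEC =====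
def Spec_get_column_name_mapping (data_df : List Int) (num_col_idx : List Int) (cat_col_idx : List Int) (target_col_idx : List Int) (column_names : List String) (out : (List (Int × Int)) × (List (Int × Int)) × (List (Int × String))) : Prop := out = get_column_name_mapping_alt data_df num_col_idx cat_col_idx target_col_idx column_names
instance (data_df : List Int) (num_col_idx : List Int) (cat_col_idx : List Int) (target_col_idx : List Int) (column_names : List String) (out : (List (Int × Int)) × (List (Int × Int)) × (List (Int × String))) : Decidable (Spec_get_column_name_mapping data_df num_col_idx cat_col_idx target_col_idx column_names out) := by unfold Spec_get_column_name_mapping; infer_instance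

-- ===== CLAIM (what is proved, stated in full; the proofs are below) =====
def Claim_equal_get_column_name_mapping : Prop := ∀ (data_df : List Int) (num_col_idx : List Int) (cat_col_idx : List Int) (target_col_idx : List Int) (column_names : List String), Dom_get_column_name_mapping data_df num_col_idx cat_col_idx target_col_idx column_names → Spec_get_column_name_mapping data_df num_col_idx cat_col_idx target_col_idx column_names (get_column_name_mapping data_df num_col_idx cat_col_idx target_col_idx column_names)

-- ===== LEMMAS AND PROOFS =====

-- 'i in set(xs)' agrees with 'i in xs'
lemma pvSetContains (xs : List Int) (i : Int) : (PySem.Set.ofList xs).contains i = xs.contains i := by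
  by_cases h : i ∈ xs <;> simp [PySem.Set.mem_ofList, h]

-- the pairs B generates for the first m column indices
def pvPairs (num_col_idx cat_col_idx : List Int) (m : Nat) : List (Int × Int) :=
  (List.range m).map (fun (k : Nat) => ((k : Int),
    pvPosB (PySem.Set.ofList num_col_idx) (PySem.Set.ofList cat_col_idx)
      (num_col_idx.length : Int) (cat_col_idx.length : Int) (k : Int)))

lemma pvPairs_fst_nodup (num cat : List Int) (m : Nat) :
    ((pvPairs num cat m).map Prod.fst).Nodup := by
  have h : (pvPairs num cat m).map Prod.fst = (List.range m).map (fun k : Nat => (k : Int)) := by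
    simp [pvPairs, List.map_map, Function.comp]
  rw [h]
  exact (List.nodup_range).map (fun a b hh => by exact_mod_cast hh)

lemma pvInvariantA (num cat : List Int) (m : Nat) :
    (List.foldl (pvStepA num cat) (PySem.Dict.empty, 0, (num.length : Int), ((num.length : Int) + (cat.length : Int)))
      ((List.range m).map (fun (k : Nat) => (k : Int)))) =
    (PySem.Dict.mk (pvPairs num cat m),
      (((List.range m).countP (fun (k : Nat) => num.contains (k : Int)) : Nat) : Int),
      (num.length : Int) + (((List.range m).countP (fun (k : Nat) => !num.contains (k : Int) && cat.contains (k : Int)) : Nat) : Int),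
      (num.length : Int) + (cat.length : Int) + (((List.range m).countP (fun (k : Nat) => !num.contains (k : Int) && !cat.contains (k : Int)) : Nat) : Int)) := by
  induction m with
  | zero => rfl
  | succ m ih =>
    have hfresh : (PySem.Dict.mk (pvPairs num cat m)).contains ((m : Nat) : Int) = false := by
      rw [PySem.Dict.contains_mk, List.any_eq_false]
      intro p hp
      simp only [pvPairs, List.mem_map, List.mem_range] at hp
      obtain ⟨k, hk, rfl⟩ := hp
      simp only [beq_iff_eq, Int.natCast_inj]
      omega
    have hpairs : pvPairs num cat (m + 1) =
        pvPairs num cat m ++ [(((m : Nat) : Int), pvPosB (PySem.Set.ofList num) (PySem.Set.ofList cat) (num.length : Int) (cat.length : Int) ((m : Nat) : Int))] := by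
      simp [pvPairs, List.range_succ]
    rw [List.range_succ, List.map_append, List.foldl_append, ih]
    simp only [List.map_cons, List.map_nil, List.foldl_cons, List.foldl_nil]
    unfold pvStepA
    have hdict : ∀ v : Int, ((PySem.Dict.mk (pvPairs num cat m)).insert ((m : Nat) : Int) v) =
        PySem.Dict.mk (pvPairs num cat m ++ [(((m : Nat) : Int), v)]) := by
      intro v
      apply PySem.Dict.ext
      rw [PySem.Dict.items_insert_of_not_contains _ _ hfresh]
    by_cases h1 : num.contains ((m : Nat) : Int)
    · have hpos : pvPosB (PySem.Set.ofList num) (PySem.Set.ofList cat) (num.length : Int) (cat.length : Int) ((m : Nat) : Int) =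
          (((List.range m).countP (fun (k : Nat) => num.contains (k : Int)) : Nat) : Int) := by
        unfold pvPosB
        simp only [pvSetContains]
        rw [if_pos h1, PySem.List.pyRange_zero_natCast, List.countP_map]
        rfl
      have hm : ((m : Nat) : Int) ∈ num := by simpa using h1
      simp only [h1, if_true, Prod.mk.injEq]
      refine ⟨?_, ?_, ?_, ?_⟩
      · rw [hdict, hpairs, hpos]
      · simp [List.countP_append, hm]
      · simp [List.countP_append, hm]
      · simp [List.countP_append, hm]
    · by_cases h2 : cat.contains ((m : Nat) : Int)
      · have hpos : pvPosB (PySem.Set.ofList num) (PySem.Set.ofList cat) (num.length : Int) (cat.length : Int) ((m : Nat) : Int) = (num.length : Int) +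
            (((List.range m).countP (fun (k : Nat) => !num.contains (k : Int) && cat.contains (k : Int)) : Nat) : Int) := by
          unfold pvPosB
          simp only [pvSetContains]
          rw [if_neg (by simpa using h1), if_pos h2, PySem.List.pyRange_zero_natCast, List.countP_map]
          rfl
        have hm1 : ((m : Nat) : Int) ∉ num := by simpa using h1
        have hm2 : ((m : Nat) : Int) ∈ cat := by simpa using h2
        simp only [h1, h2, if_true, if_false, Bool.false_eq_true, Prod.mk.injEq]
        refine ⟨?_, ?_, ?_, ?_⟩
        · rw [hdict, hpairs, hpos]
        · simp [List.countP_append, hm1]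
        · simp [List.countP_append, hm1, hm2]
          ring
        · simp [List.countP_append, hm1, hm2]
      · have hpos : pvPosB (PySem.Set.ofList num) (PySem.Set.ofList cat) (num.length : Int) (cat.length : Int) ((m : Nat) : Int) = (num.length : Int) + (cat.length : Int) +
            (((List.range m).countP (fun (k : Nat) => !num.contains (k : Int) && !cat.contains (k : Int)) : Nat) : Int) := by
          unfold pvPosB
          simp only [pvSetContains]
          rw [if_neg (by simpa using h1), if_neg (by simpa using h2), PySem.List.pyRange_zero_natCast, List.countP_map]
          rfl
        have hm1 : ((m : Nat) : Int) ∉ num := by simpa using h1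
        have hm2 : ((m : Nat) : Int) ∉ cat := by simpa using h2
        simp only [h1, h2, if_false, Bool.false_eq_true, Prod.mk.injEq]
        refine ⟨?_, ?_, ?_, ?_⟩
        · rw [hdict, hpairs, hpos]
        · simp [List.countP_append, hm1]
        · simp [List.countP_append, hm1, hm2]
        · simp [List.countP_append, hm1, hm2]
          ring

lemma pvOfList_pairs (num cat : List Int) (m : Nat) :
    PySem.Dict.ofList (pvPairs num cat m) = PySem.Dict.mk (pvPairs num cat m) := by
  apply PySem.Dict.ext
  have h := PySem.Dict.items_foldl_insert_fresh (pvPairs num cat m) (Prod.fst : Int × Int → Int) (Prod.snd : Int × Int → Int)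
      (PySem.Dict.empty : PySem.Dict Int Int)
      (fun a _ => PySem.Dict.contains_empty a.1) (pvPairs_fst_nodup num cat m)
  rw [show PySem.Dict.ofList (pvPairs num cat m) =
      (pvPairs num cat m).foldl (fun (d : PySem.Dict Int Int) p => d.insert p.1 p.2) PySem.Dict.empty from rfl]
  simpa using h

theorem get_column_name_mapping_spec : Claim_equal_get_column_name_mapping := by
  intro data_df num cat tgt names _
  show get_column_name_mapping data_df num cat tgt names = get_column_name_mapping_alt data_df num cat tgt names
  unfold get_column_name_mapping get_column_name_mapping_alt
  have hlen : PySem.List.len names = ((names.length : Nat) : Int) := rfl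
  rw [hlen]
  simp only [PySem.List.pyRange_zero_natCast]
  rw [pvInvariantA]
  rw [show List.map (fun i => (i, pvPosB (PySem.Set.ofList num) (PySem.Set.ofList cat) (num.length : Int) (cat.length : Int) i)) (List.map (fun (k : Nat) => (k : Int)) (List.range names.length)) =
      pvPairs num cat names.length from by simp [pvPairs, List.map_map]]
  rw [pvOfList_pairs]
  have hinv : ∀ L : List (Int × Int),
      PySem.Dict.ofList (L.map (fun kv => (kv.2, kv.1))) =
      L.foldl (fun (d : PySem.Dict Int Int) kv => d.insert kv.2 kv.1) PySem.Dict.empty := by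
    intro L
    rw [show PySem.Dict.ofList (L.map (fun kv => (kv.2, kv.1))) =
        (L.map (fun kv => (kv.2, kv.1))).foldl (fun (d : PySem.Dict Int Int) p => d.insert p.1 p.2)
          PySem.Dict.empty from rfl, List.foldl_map]
  have hnames : PySem.Dict.ofList (PySem.List.enumerate names) =
      (List.map (fun (k : Nat) => (k : Int)) (List.range names.length)).foldl
        (fun (d : PySem.Dict Int String) i => d.insert i (PySem.List.pyGetD names i "")) PySem.Dict.empty := by
    rw [PySem.List.enumerate_eq_map_pyRange names "", hlen, PySem.List.pyRange_zero_natCast]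
    rw [show ∀ P : List (Int × String), PySem.Dict.ofList P =
        P.foldl (fun (d : PySem.Dict Int String) p => d.insert p.1 p.2) PySem.Dict.empty
        from fun _ => rfl, List.foldl_map]
  rw [hinv, hnames]
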